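-- pv_equiv track=rewrite | github.com/YadavAashutosh/GestureVox-AR-Voxel-Builder | shape_library/shapes.py | shape_cylinder
-- ===== SOURCE A (Python) =====
-- from typing import List, Tuple
--
-- Coord = Tuple[int, int, int]
--
-- def shape_cylinder(radius=2, height=4) -> List[Coord]:
--     pts = []
--     for y in range(height):
--         for x in range(-radius, radius+1):
--             for z in range(-radius, radius+1):
--                 if x*x + z*z <= radius*radius:
--                     pts.append((x, y, z))
--     return pts
-- ===== SOURCE B (Python) =====
-- from typing import List, Tuple
--
-- Coord = Tuple[int, int, int]
--
-- def shape_cylinder(radius=2, height=4) -> List[Coord]: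
--     if height <= 0:
--         return []
--     # zmax[t] = largest z >= 0 with z*z + t*t <= radius*radius, computed for
--     # t = 0..radius with a decreasing two-pointer (no per-cell membership test).
--     zmax = []
--     zm = radius
--     for t in range(radius + 1):
--         while zm * zm + t * t > radius * radius:
--             zm -= 1
--         zmax.append(zm)
--     rows = [(x, zmax[x if x >= 0 else -x]) for x in range(-radius, radius + 1)]
--     return [(x, y, z)
--             for y in range(height)
--             for (x, m) in rows
--             for z in range(-m, m + 1)]
-- ===== Notes on version B (the rewrite author's own statement) =====
-- stated objective: alternative
-- what changed: B replaces the per-cell circle membership test over the (2r+1)^2 bounding box with a two-pointer integer-sqrt scan (plus an early return for non-positive height) that computes, for each |x|, the exact z-extent zmax, then emits each row as the consecutive range(-zmax, zmax+1) with no test at all.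
import Mathlib
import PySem

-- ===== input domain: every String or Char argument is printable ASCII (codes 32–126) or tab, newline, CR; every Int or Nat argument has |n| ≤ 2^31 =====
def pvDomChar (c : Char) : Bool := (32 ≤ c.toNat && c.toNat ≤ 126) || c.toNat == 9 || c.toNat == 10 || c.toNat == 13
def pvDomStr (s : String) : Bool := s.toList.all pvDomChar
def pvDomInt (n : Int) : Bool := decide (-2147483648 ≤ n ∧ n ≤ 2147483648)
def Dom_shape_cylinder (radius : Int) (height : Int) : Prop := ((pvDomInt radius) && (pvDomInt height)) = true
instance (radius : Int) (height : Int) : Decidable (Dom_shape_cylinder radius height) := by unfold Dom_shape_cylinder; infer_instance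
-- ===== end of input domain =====

-- B computes each row's exact z-extent once by a two-pointer integer-sqrt scan and
-- emits consecutive z-ranges, instead of testing every cell of the bounding box.

-- ===== PORT A =====
def shape_cylinder (radius : Int) (height : Int) : List (Int × Int × Int) :=
  (PySem.List.pyRange 0 height 1).foldl (fun pts y =>
    (PySem.List.pyRange (-radius) (radius + 1) 1).foldl (fun pts x =>
      (PySem.List.pyRange (-radius) (radius + 1) 1).foldl (fun pts z =>
        if x * x + z * z ≤ radius * radius then pts ++ [(x, y, z)] else pts) pts) pts) []

-- ===== PORT B =====
-- the 'while zm*zm + t*t > radius*radius: zm -= 1' loop of Source B; the '0 < zm'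
-- guard only makes it total (Python never reaches zm = 0 with the test still true
-- for Source B's calls, where t*t ≤ radius*radius)
def cylShrink (rr tt zm : Int) : Int :=
  if rr < zm * zm + tt * tt ∧ 0 < zm then cylShrink rr tt (zm - 1) else zm
termination_by zm.toNat
decreasing_by omega

-- the 'for t in range(radius+1)' loop building zmax, state = (zmax, zm)
def cylZmax (radius : Int) : List Int :=
  ((PySem.List.pyRange 0 (radius + 1) 1).foldl
    (fun (st : List Int × Int) t =>
      let z := cylShrink (radius * radius) t st.2
      (st.1 ++ [z], z)) ([], radius)).1

def shape_cylinder_alt (radius : Int) (height : Int) : List (Int × Int × Int) :=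
  if height ≤ 0 then [] else
  let zmax := cylZmax radius
  -- zmax[x if x >= 0 else -x]: the index is always in range in Source B; pyGetD is exact there
  let rows := (PySem.List.pyRange (-radius) (radius + 1) 1).map
    (fun x => (x, PySem.List.pyGetD zmax (if 0 ≤ x then x else -x) 0))
  (PySem.List.pyRange 0 height 1).flatMap (fun y =>
    rows.flatMap (fun xm =>
      (PySem.List.pyRange (-xm.2) (xm.2 + 1) 1).map (fun z => (xm.1, y, z))))

-- ===== PRECONDITION & SPEC =====
def Spec_shape_cylinder (radius : Int) (height : Int) (out : List (Int × Int × Int)) : Prop := out = shape_cylinder_alt radius height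
instance (radius : Int) (height : Int) (out : List (Int × Int × Int)) : Decidable (Spec_shape_cylinder radius height out) := by unfold Spec_shape_cylinder; infer_instance

-- ===== CLAIM =====
def Claim_equal_shape_cylinder : Prop := ∀ (radius : Int) (height : Int), Dom_shape_cylinder radius height → Spec_shape_cylinder radius height (shape_cylinder radius height)

-- ===== LEMMAS AND PROOFS =====

-- the intended value of each zmax entry: the integer sqrt of radius² − t²
def msq (radius t : Int) : Int := ((radius * radius - t * t).toNat.sqrt : Int)

theorem msq_nonneg (radius t : Int) : 0 ≤ msq radius t := by
  unfold msq; positivity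

theorem msq_sq_le (radius t : Int) (h : t * t ≤ radius * radius) :
    msq radius t * msq radius t + t * t ≤ radius * radius := by
  unfold msq
  have hd : ((radius * radius - t * t).toNat : Int) = radius * radius - t * t :=
    Int.toNat_of_nonneg (by omega)
  have h := Int.ofNat_le.mpr (Nat.sqrt_le' (radius * radius - t * t).toNat)
  push_cast at h
  rw [hd] at h
  nlinarith [h]

theorem msq_lt (radius t : Int) :
    radius * radius < (msq radius t + 1) * (msq radius t + 1) + t * t := by
  unfold msq
  have h1 : radius * radius - t * t ≤ ((radius * radius - t * t).toNat : Int) :=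
    Int.self_le_toNat _
  have := Nat.lt_succ_sqrt' (radius * radius - t * t).toNat
  have := (Int.ofNat_lt.mpr this)
  push_cast at this ⊢
  nlinarith

theorem msq_anti (radius t : Int) (ht : 0 ≤ t) :
    msq radius (t + 1) ≤ msq radius t := by
  unfold msq
  have h : radius * radius - (t + 1) * (t + 1) ≤ radius * radius - t * t := by nlinarith
  exact_mod_cast Nat.sqrt_le_sqrt (Int.toNat_le_toNat h)

theorem msq_le_radius (radius t : Int) (hr : 0 ≤ radius) (h : t * t ≤ radius * radius) :
    msq radius t ≤ radius := by
  have h1 := msq_sq_le radius t h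
  have h2 := msq_nonneg radius t
  nlinarith

theorem cylShrink_eq (rr tt m : Int) (hm : 0 ≤ m)
    (hle : m * m + tt * tt ≤ rr) (hub : rr < (m + 1) * (m + 1) + tt * tt) :
    ∀ (n : ℕ) (zm : Int), (zm - m).toNat = n → m ≤ zm → cylShrink rr tt zm = m := by
  intro n
  induction n with
  | zero =>
    intro zm hn hz
    have hzm : zm = m := by omega
    subst hzm
    rw [cylShrink, if_neg]
    rintro ⟨h1, _⟩
    linarith
  | succ k ih =>
    intro zm hn hz
    have hlt : m < zm := by omega
    have hbig : rr < zm * zm + tt * tt := by nlinarith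
    rw [cylShrink, if_pos ⟨hbig, by omega⟩]
    exact ih (zm - 1) (by omega) (by omega)

theorem cylZmax_fold (radius : Int) (hr : 0 ≤ radius) :
    ∀ (n : ℕ) (a zm : Int) (acc : List Int), (radius + 1 - a).toNat = n → 0 ≤ a →
      msq radius a ≤ zm →
      ((PySem.List.pyRange a (radius + 1) 1).foldl
        (fun (st : List Int × Int) t =>
          let z := cylShrink (radius * radius) t st.2
          (st.1 ++ [z], z)) (acc, zm)).1
      = acc ++ (PySem.List.pyRange a (radius + 1) 1).map (msq radius) := by
  intro n
  induction n with
  | zero =>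
    intro a zm acc hn _ _
    rw [PySem.List.pyRange_one_eq_nil (by omega)]
    simp
  | succ k ih =>
    intro a zm acc hn ha hzm
    have hab : a < radius + 1 := by omega
    rw [PySem.List.pyRange_one_cons hab]
    simp only [List.foldl_cons, List.map_cons]
    have hta : a * a ≤ radius * radius := by nlinarith
    have hstep : cylShrink (radius * radius) a zm = msq radius a :=
      cylShrink_eq _ _ _ (msq_nonneg radius a) (msq_sq_le radius a hta)
        (msq_lt radius a) (zm - msq radius a).toNat zm rfl hzm
    simp only [hstep]
    rw [ih (a + 1) (msq radius a) (acc ++ [msq radius a]) (by omega) (by omega)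
        (msq_anti radius a ha)]
    simp

theorem cylZmax_eq (radius : Int) (hr : 0 ≤ radius) :
    cylZmax radius = (PySem.List.pyRange 0 (radius + 1) 1).map (msq radius) := by
  unfold cylZmax
  rw [cylZmax_fold radius hr (radius + 1 - 0).toNat 0 radius [] rfl le_rfl
      (msq_le_radius radius 0 hr (by positivity))]
  simp

-- filter of a consecutive int range by a window predicate = the consecutive window
theorem filterMap_range_window {α : Type} (c d : Int) (f : Int → α)
    (p : Int → Prop) [DecidablePred p] (hp : ∀ z, p z ↔ (c ≤ z ∧ z < d)) :
    ∀ (n : ℕ) (A B : Int), (B - A).toNat = n → d ≤ B →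
      (PySem.List.pyRange A B 1).filterMap (fun z => if p z then some (f z) else none)
        = (PySem.List.pyRange (max A c) d 1).map f := by
  intro n
  induction n with
  | zero =>
    intro A B hn hd
    rw [PySem.List.pyRange_one_eq_nil (show B ≤ A by omega),
        PySem.List.pyRange_one_eq_nil (show d ≤ max A c by
          have := le_max_left A c; omega)]
    simp
  | succ k ih =>
    intro A B hn hd
    have hAB : A < B := by omega
    rw [PySem.List.pyRange_one_cons hAB]
    simp only [List.filterMap_cons]
    by_cases hA : p A
    · rw [if_pos hA]
      obtain ⟨hc, hdA⟩ := (hp A).mp hA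
      have hmax : max A c = A := max_eq_left hc
      have hmax' : max (A + 1) c = A + 1 := max_eq_left (by omega)
      rw [ih (A + 1) B (by omega) hd, hmax', hmax,
          PySem.List.pyRange_one_cons hdA]
      simp
    · rw [if_neg hA]
      rw [ih (A + 1) B (by omega) hd]
      have hA' := (hp A).not.mp hA
      by_cases hAc : A < c
      · have : max A c = c := max_eq_right (by omega)
        have : max (A + 1) c = c := max_eq_right (by omega)
        simp [max_eq_right (show A ≤ c by omega), max_eq_right (show A + 1 ≤ c by omega)]
      · have hdA : d ≤ A := by
          rcases not_and_or.mp hA' with h | h <;> omega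
        rw [PySem.List.pyRange_one_eq_nil (show d ≤ max (A + 1) c by
              have := le_max_left (A + 1) c; omega),
            PySem.List.pyRange_one_eq_nil (show d ≤ max A c by
              have := le_max_left A c; omega)]

-- folding an "append one element, filtered" body = acc ++ filterMap
theorem pv_foldl_if_append {α β : Type} (p : α → Prop) [DecidablePred p] (f : α → β) :
    ∀ (xs : List α) (acc : List β),
      xs.foldl (fun a x => if p x then a ++ [f x] else a) acc
        = acc ++ xs.filterMap (fun x => if p x then some (f x) else none) := by
  intro xs
  induction xs with
  | nil => intro acc; simp
  | cons x xs ih =>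
    intro acc
    by_cases hx : p x <;> simp [hx, ih]

-- folding a body of shape "acc ++ g x" = acc ++ flatMap
theorem pv_foldl_append_flatMap {α β : Type} (g : α → List β)
    (F : List β → α → List β) (hF : ∀ a x, F a x = a ++ g x) :
    ∀ (xs : List α) (acc : List β),
      xs.foldl F acc = acc ++ xs.flatMap g := by
  intro xs
  induction xs with
  | nil => intro acc; simp
  | cons x xs ih => intro acc; simp [hF, ih]

theorem shape_cylinder_eq (radius height : Int) :
    shape_cylinder radius height
      = (PySem.List.pyRange 0 height 1).flatMap (fun y =>
          (PySem.List.pyRange (-radius) (radius + 1) 1).flatMap (fun x =>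
            (PySem.List.pyRange (-radius) (radius + 1) 1).filterMap (fun z =>
              if x * x + z * z ≤ radius * radius then some (x, y, z) else none))) := by
  unfold shape_cylinder
  rw [pv_foldl_append_flatMap
      (g := fun y => (PySem.List.pyRange (-radius) (radius + 1) 1).flatMap (fun x =>
          (PySem.List.pyRange (-radius) (radius + 1) 1).filterMap (fun z =>
            if x * x + z * z ≤ radius * radius then some (x, y, z) else none)))]
  · simp
  · intro a y
    rw [pv_foldl_append_flatMap
        (g := fun x => (PySem.List.pyRange (-radius) (radius + 1) 1).filterMap (fun z =>
            if x * x + z * z ≤ radius * radius then some (x, y, z) else none))]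
    intro b x
    exact pv_foldl_if_append (fun z => x * x + z * z ≤ radius * radius) (fun z => (x, y, z)) _ b

-- ===== VERDICT =====
theorem shape_cylinder_spec : Claim_equal_shape_cylinder := by
  intro radius height _
  unfold Spec_shape_cylinder
  rw [shape_cylinder_eq]
  unfold shape_cylinder_alt
  by_cases hh : height ≤ 0
  · rw [if_pos hh, PySem.List.pyRange_one_eq_nil hh]
    simp
  rw [if_neg hh]
  simp only [List.flatMap_map]
  refine List.flatMap_congr ?_
  intro y _
  refine (List.flatMap_congr ?_)
  intro x hx
  rw [PySem.List.mem_pyRange_one] at hx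
  have hr : 0 ≤ radius := by omega
  rw [cylZmax_eq radius hr]
  set i : Int := if 0 ≤ x then x else -x with hi
  have hi0 : 0 ≤ i := by rw [hi]; split <;> omega
  have hin : i < radius + 1 := by rw [hi]; split <;> omega
  rw [PySem.List.pyGetD_map_pyRange_of_nonneg (msq radius) (radius + 1) i 0 hi0 hin]
  have hii : i * i = x * x := by rw [hi]; split <;> ring
  set m : Int := msq radius i with hm
  have hti : i * i ≤ radius * radius := by nlinarith
  have hmle := msq_sq_le radius i hti
  have hmub := msq_lt radius i
  have hm0 := msq_nonneg radius i
  have hmr := msq_le_radius radius i hr hti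
  rw [← hm] at hmle hmub hm0 hmr
  have hp : ∀ z, x * x + z * z ≤ radius * radius ↔ (-m ≤ z ∧ z < m + 1) := by
    intro z
    constructor
    · intro h
      constructor <;> nlinarith
    · rintro ⟨h1, h2⟩
      nlinarith
  rw [filterMap_range_window (-m) (m + 1) (fun z => (x, y, z))
      (fun z => x * x + z * z ≤ radius * radius) hp
      (radius + 1 - (-radius)).toNat (-radius) (radius + 1) rfl (by omega)]
  rw [max_eq_right (show -radius ≤ -m by omega)]
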